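-- pv_equiv track=rewrite | github.com/ilena031/ChestX-Ray | research/fp-medical-banun.py | normalize_scenarios
-- ===== SOURCE A (Python) =====
-- def normalize_scenarios(values, fallback=None):
--     fallback = fallback or ['balanced', 'imbalanced']
--     valid = {'balanced', 'imbalanced'}
--     out = []
--     for v in values or []:
--         s = str(v).strip().lower()
--         if s in valid and s not in out:
--             out.append(s)
--     return out or fallback
-- ===== SOURCE B (Python) =====
-- def normalize_scenarios(values, fallback=None):
--     norm = [str(v).strip().lower() for v in (values or [])]
--     hits = []
--     for tok in ('balanced', 'imbalanced'):
--         if tok in norm: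
--             hits.append((norm.index(tok), tok))
--     hits.sort()
--     out = [tok for _, tok in hits]
--     return out or fallback or ['balanced', 'imbalanced']
-- ===== Notes on version B (the rewrite author's own statement) =====
-- stated objective: alternative
-- what changed: Instead of one interleaved scan maintaining a dedup accumulator, B normalizes all values, then for each of the two valid tokens records its first index and sorts the (index, token) pairs, so the output order comes from first-occurrence indices rather than from the scan itself.
import Mathlib
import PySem

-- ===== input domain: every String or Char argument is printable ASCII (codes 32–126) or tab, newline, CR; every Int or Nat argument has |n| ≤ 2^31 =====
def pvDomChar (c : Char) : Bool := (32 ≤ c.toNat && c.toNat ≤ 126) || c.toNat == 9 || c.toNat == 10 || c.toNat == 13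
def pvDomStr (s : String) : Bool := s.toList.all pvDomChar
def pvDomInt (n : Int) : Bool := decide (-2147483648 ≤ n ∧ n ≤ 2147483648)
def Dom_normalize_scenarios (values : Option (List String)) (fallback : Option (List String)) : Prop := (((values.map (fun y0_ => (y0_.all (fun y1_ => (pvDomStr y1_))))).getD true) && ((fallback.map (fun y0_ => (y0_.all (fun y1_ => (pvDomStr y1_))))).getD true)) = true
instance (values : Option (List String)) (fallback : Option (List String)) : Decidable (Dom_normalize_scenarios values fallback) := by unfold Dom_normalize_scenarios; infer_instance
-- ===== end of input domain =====

-- B replaces A's interleaved scan-with-dedup-accumulator by: normalize all values, record the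
-- first index of each of the two valid tokens, sort the (index, token) pairs; same return values.


-- ===== PORT A =====
-- shared normalization helper: str(v).strip().lower() (v is already a str here)
def nsNorm (v : String) : String := PySem.Str.lower (PySem.Str.strip v)

-- A's for-loop: accumulator out, append if valid and not already present
def nsLoop (out : List String) : List String → List String
  | [] => out
  | v :: rest =>
    let s := nsNorm v
    nsLoop (if (s == "balanced" || s == "imbalanced") && !(out.contains s) then out ++ [s] else out) rest

def normalize_scenarios (values : Option (List String)) (fallback : Option (List String)) : List String :=
  -- fallback = fallback or ['balanced', 'imbalanced']
  let fb := match fallback with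
    | none => ["balanced", "imbalanced"]
    | some l => if l = [] then ["balanced", "imbalanced"] else l
  -- for v in values or []
  let vs := match values with
    | none => []
    | some l => l
  let out := nsLoop [] vs
  -- return out or fallback
  if out = [] then fb else out

-- ===== PORT B =====
def normalize_scenarios_alt (values : Option (List String)) (fallback : Option (List String)) : List String :=
  let norm := (match values with | none => [] | some l => l).map nsNorm
  let hits := (["balanced", "imbalanced"] : List String).foldl
    (fun hits tok =>
      if norm.contains tok then
        match PySem.List.index? norm tok with  -- norm.index(tok); guard makes it some
        | some k => hits ++ [(k, tok)]
        | none => hits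
      else hits) []
  let sortedHits := PySem.List.sorted2 hits (fun p => p.1) (fun p => p.2)  -- hits.sort(): tuple order
  let out := sortedHits.map (fun p => p.2)
  -- return out or fallback or ['balanced', 'imbalanced']
  if out = [] then
    match fallback with
    | none => ["balanced", "imbalanced"]
    | some l => if l = [] then ["balanced", "imbalanced"] else l
  else out

-- ===== PRECONDITION & SPEC =====
def Spec_normalize_scenarios (values : Option (List String)) (fallback : Option (List String)) (out : List String) : Prop := out = normalize_scenarios_alt values fallback
instance (values : Option (List String)) (fallback : Option (List String)) (out : List String) : Decidable (Spec_normalize_scenarios values fallback out) := by unfold Spec_normalize_scenarios; infer_instance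

-- ===== CLAIM (what is proved, stated in full; the proofs are below) =====
def Claim_equal_normalize_scenarios : Prop := ∀ (values : Option (List String)) (fallback : Option (List String)), Dom_normalize_scenarios values fallback → Spec_normalize_scenarios values fallback (normalize_scenarios values fallback)

-- ===== LEMMAS AND PROOFS =====

-- canonical result of the filter/dedup, in terms of first-occurrence indices of the two tokens
def nsSpec (l : List String) : List String :=
  match PySem.List.index? l "balanced", PySem.List.index? l "imbalanced" with
  | some b, some i => if b < i then ["balanced", "imbalanced"] else ["imbalanced", "balanced"]
  | some _, none => ["balanced"]
  | none, some _ => ["imbalanced"]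
  | none, none => []

-- pure-token version of A's loop (over the normalized list)
def nsGo (out : List String) : List String → List String
  | [] => out
  | s :: rest =>
    nsGo (if (s == "balanced" || s == "imbalanced") && !(out.contains s) then out ++ [s] else out) rest

theorem nsLoop_eq_nsGo (vs : List String) (out : List String) :
    nsLoop out vs = nsGo out (vs.map nsNorm) := by
  induction vs generalizing out with
  | nil => rfl
  | cons v rest ih => simp [nsLoop, nsGo, ih]

theorem nsGo_sat (l : List String) (out : List String)
    (hb : "balanced" ∈ out) (hi : "imbalanced" ∈ out) : nsGo out l = out := by
  induction l with
  | nil => rfl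
  | cons s rest ih =>
    simp only [nsGo]
    by_cases h : s = "balanced" <;> by_cases h2 : s = "imbalanced" <;>
      simp [h, h2, hb, hi, ih]

theorem nsGo_one (l : List String) (t u : String)
    (htu : (t = "balanced" ∧ u = "imbalanced") ∨ (t = "imbalanced" ∧ u = "balanced")) :
    nsGo [t] l = if u ∈ l then [t, u] else [t] := by
  induction l with
  | nil => simp [nsGo]
  | cons s rest ih =>
    rcases htu with ⟨ht, hu⟩ | ⟨ht, hu⟩
    · subst ht; subst hu
      simp only [nsGo]
      by_cases h2 : s = "imbalanced"
      · subst h2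
        simp [nsGo_sat, List.mem_cons]
      · by_cases h : s = "balanced"
        · subst h
          simp [ih, List.mem_cons]
        · have h2' : ("imbalanced" : String) ≠ s := fun e => h2 e.symm
          simp [h, h2, h2', ih, List.mem_cons]
    · subst ht; subst hu
      simp only [nsGo]
      by_cases h2 : s = "balanced"
      · subst h2
        simp [nsGo_sat, List.mem_cons]
      · by_cases h : s = "imbalanced"
        · subst h
          simp [ih, List.mem_cons]
        · have h2' : ("balanced" : String) ≠ s := fun e => h2 e.symm
          simp [h, h2, h2', ih, List.mem_cons]

theorem nsGo_spec (l : List String) : nsGo [] l = nsSpec l := by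
  induction l with
  | nil => rfl
  | cons s rest ih =>
    by_cases hb : s = "balanced"
    · subst hb
      have h1 : nsGo [] ("balanced" :: rest) = nsGo ["balanced"] rest := by simp [nsGo]
      rw [h1, nsGo_one rest "balanced" "imbalanced" (Or.inl ⟨rfl, rfl⟩)]
      have e1 := PySem.List.index?_cons_self "balanced" rest
      have e2 := PySem.List.index?_cons_of_ne (x := "balanced") (v := "imbalanced") rest (by decide)
      simp only [nsSpec, e1, e2]
      cases hx : PySem.List.index? rest "imbalanced" with
      | none => simp [(PySem.List.index?_eq_none_iff rest "imbalanced").mp (by simpa using hx)]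
      | some i =>
        have : "imbalanced" ∈ rest := (PySem.List.index?_isSome_iff rest "imbalanced").mp (by rw [hx]; rfl)
        simp [this]
    · by_cases hi : s = "imbalanced"
      · subst hi
        have h1 : nsGo [] ("imbalanced" :: rest) = nsGo ["imbalanced"] rest := by simp [nsGo]
        rw [h1, nsGo_one rest "imbalanced" "balanced" (Or.inr ⟨rfl, rfl⟩)]
        have e1 := PySem.List.index?_cons_self "imbalanced" rest
        have e2 := PySem.List.index?_cons_of_ne (x := "imbalanced") (v := "balanced") rest (by decide)
        simp only [nsSpec, e1, e2]
        cases hx : PySem.List.index? rest "balanced" with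
        | none => simp [(PySem.List.index?_eq_none_iff rest "balanced").mp (by simpa using hx)]
        | some b =>
          have : "balanced" ∈ rest := (PySem.List.index?_isSome_iff rest "balanced").mp (by rw [hx]; rfl)
          simp [this]
      · have h1 : nsGo [] (s :: rest) = nsGo [] rest := by simp [nsGo, hb, hi]
        rw [h1, ih]
        have e1 := PySem.List.index?_cons_of_ne (x := s) (v := "balanced") rest (by simpa using hb)
        have e2 := PySem.List.index?_cons_of_ne (x := s) (v := "imbalanced") rest (by simpa using hi)
        simp only [nsSpec, e1, e2]
        cases hx : PySem.List.index? rest "balanced" <;>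
          cases hy : PySem.List.index? rest "imbalanced" <;> simp

-- distinct tokens have distinct first indices
theorem index?_ne (l : List String) (b i : Nat)
    (hb : PySem.List.index? l "balanced" = some b)
    (hi : PySem.List.index? l "imbalanced" = some i) : b ≠ i := by
  obtain ⟨hkb, hgb, -⟩ := PySem.List.getElem_of_index?_eq_some hb
  obtain ⟨hki, hgi, -⟩ := PySem.List.getElem_of_index?_eq_some hi
  intro h
  subst h
  rw [hgb] at hgi
  exact absurd hgi (by decide)

-- B's core (hits / sort / map-snd) equals the canonical result
theorem alt_core (norm : List String) :
    (PySem.List.sorted2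
      ((["balanced", "imbalanced"] : List String).foldl
        (fun hits tok =>
          if norm.contains tok then
            match PySem.List.index? norm tok with
            | some k => hits ++ [(k, tok)]
            | none => hits
          else hits) [])
      (fun p => p.1) (fun p => p.2)).map (fun p => p.2) = nsSpec norm := by
  have hmem : ∀ (tok : String) (k : Nat), PySem.List.index? norm tok = some k → tok ∈ norm := by
    intro tok k h
    obtain ⟨hk, hg, -⟩ := PySem.List.getElem_of_index?_eq_some h
    exact hg ▸ norm.getElem_mem hk
  cases hx : PySem.List.index? norm "balanced" with
  | none =>
    have hx' : List.idxOf? "balanced" norm = none := by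
      rw [← PySem.List.index?_eq_idxOf?]; exact hx
    have hxm := (PySem.List.index?_eq_none_iff norm "balanced").mp hx
    cases hy : PySem.List.index? norm "imbalanced" with
    | none =>
      have hy' : List.idxOf? "imbalanced" norm = none := by
        rw [← PySem.List.index?_eq_idxOf?]; exact hy
      have hym := (PySem.List.index?_eq_none_iff norm "imbalanced").mp hy
      simp [List.foldl, hxm, hym, nsSpec, hx', hy', PySem.List.sorted2]
    | some i =>
      have hy' : List.idxOf? "imbalanced" norm = some i := by
        rw [← PySem.List.index?_eq_idxOf?]; exact hy
      have hym := hmem _ _ hy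
      simp [List.foldl, hxm, hym, nsSpec, hx', hy',
        PySem.List.sorted2, PySem.List.insertBy]
  | some b =>
    have hx' : List.idxOf? "balanced" norm = some b := by
      rw [← PySem.List.index?_eq_idxOf?]; exact hx
    have hxm := hmem _ _ hx
    cases hy : PySem.List.index? norm "imbalanced" with
    | none =>
      have hy' : List.idxOf? "imbalanced" norm = none := by
        rw [← PySem.List.index?_eq_idxOf?]; exact hy
      have hym := (PySem.List.index?_eq_none_iff norm "imbalanced").mp hy
      simp [List.foldl, hxm, hym, nsSpec, hx', hy',
        PySem.List.sorted2, PySem.List.insertBy]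
    | some i =>
      have hy' : List.idxOf? "imbalanced" norm = some i := by
        rw [← PySem.List.index?_eq_idxOf?]; exact hy
      have hym := hmem _ _ hy
      have hne := index?_ne norm b i hx hy
      rcases Nat.lt_or_ge b i with hlt | hge
      · simp [List.foldl, hxm, hym, nsSpec, hx', hy',
          PySem.List.sorted2, PySem.List.insertBy, hlt, Nat.lt_asymm hlt]
      · have hgt : i < b := lt_of_le_of_ne hge (Ne.symm hne)
        simp [List.foldl, hxm, hym, nsSpec, hx', hy',
          PySem.List.sorted2, PySem.List.insertBy, hgt, Nat.lt_asymm hgt]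

-- ===== VERDICT (by name: the statement is the Claim_ definition above) =====
theorem normalize_scenarios_spec : Claim_equal_normalize_scenarios := by
  intro values fallback _
  unfold Spec_normalize_scenarios normalize_scenarios normalize_scenarios_alt
  simp only [nsLoop_eq_nsGo, nsGo_spec, alt_core]
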